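-- pv_equiv track=rewrite | github.com/JoshuaPost/TP_Dashboard | Dashboard.py | guess_quarter
-- ===== SOURCE A (Python) =====
-- def guess_quarter(text):
--     """Roughly assign a deadline to a quarter."""
--     t = text.lower()
--     months = {
--         "january": 1, "february": 2, "march": 3, "april": 4,
--         "may": 5, "june": 6, "july": 7, "august": 8,
--         "september": 9, "october": 10, "november": 11, "december": 12,
--     }
--     for m, n in months.items():
--         if m in t:
--             if n <= 3: return "Q1"
--             elif n <= 6: return "Q2"
--             elif n <= 9: return "Q3"
--             else: return "Q4"
--     return "Unscheduled"
-- ===== SOURCE B (Python) =====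
-- def guess_quarter(text):
--     """Roughly assign a deadline to a quarter."""
--     t = text.lower()
--     MONTHS = ["january", "february", "march", "april", "may", "june",
--               "july", "august", "september", "october", "november", "december"]
--     hits = [i + 1 for i, m in enumerate(MONTHS) if m in t]
--     if not hits:
--         return "Unscheduled"
--     return "Q" + str((min(hits) - 1) // 3 + 1)
-- ===== Notes on version B (the rewrite author's own statement) =====
-- stated objective: alternative
-- what changed: Replaces the first-match early-return loop with a threshold ladder by a gather-all-matching-month-numbers comprehension followed by min() and the closed-form quarter formula (m-1)//3 + 1.
import Mathlib
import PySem

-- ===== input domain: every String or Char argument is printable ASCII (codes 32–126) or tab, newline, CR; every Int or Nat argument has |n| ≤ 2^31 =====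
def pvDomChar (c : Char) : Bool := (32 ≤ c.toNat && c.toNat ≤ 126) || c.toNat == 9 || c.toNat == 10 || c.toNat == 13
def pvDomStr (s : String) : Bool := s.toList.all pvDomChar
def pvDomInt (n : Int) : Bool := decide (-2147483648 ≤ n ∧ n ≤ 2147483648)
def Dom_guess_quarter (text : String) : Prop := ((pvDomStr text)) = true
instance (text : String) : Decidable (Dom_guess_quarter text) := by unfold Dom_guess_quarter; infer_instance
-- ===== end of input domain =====

-- B replaces A's first-match early-return ladder with gather-all-matching-months, min(), and closed-form quarter arithmetic (alternative decomposition, same cost).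


-- ===== PORT A =====
-- the months dict of A, in insertion order
def monthsA : List (String × Int) :=
  [("january", 1), ("february", 2), ("march", 3), ("april", 4),
   ("may", 5), ("june", 6), ("july", 7), ("august", 8),
   ("september", 9), ("october", 10), ("november", 11), ("december", 12)]

-- the 'for m, n in months.items():' loop with its early returns
def guessLoopA (t : String) : List (String × Int) → String
  | [] => "Unscheduled"
  | (m, n) :: rest =>
    if PySem.Str.isIn m t then
      if n ≤ 3 then "Q1"
      else if n ≤ 6 then "Q2"
      else if n ≤ 9 then "Q3"
      else "Q4"
    else guessLoopA t rest

def guess_quarter (text : String) : String :=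
  guessLoopA (PySem.Str.lower text) monthsA

-- ===== PORT B =====
def monthsB : List String :=
  ["january", "february", "march", "april", "may", "june",
   "july", "august", "september", "october", "november", "december"]

def guess_quarter_alt (text : String) : String :=
  let t := PySem.Str.lower text
  let hits : List Int :=
    (PySem.List.enumerate monthsB).filterMap
      (fun p => if PySem.Str.isIn p.2 t then some (p.1 + 1) else none)
  match PySem.List.min? hits (fun x => x) with
  | none => "Unscheduled"
  | some v => "Q" ++ PySem.Int.toStr (PySem.Int.floordiv (v - 1) 3 + 1)

-- ===== PRECONDITION & SPEC =====
def Spec_guess_quarter (text : String) (out : String) : Prop := out = guess_quarter_alt text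
instance (text : String) (out : String) : Decidable (Spec_guess_quarter text out) := by unfold Spec_guess_quarter; infer_instance

-- ===== CLAIM (what is proved, stated in full; the proofs are below) =====
def Claim_equal_guess_quarter : Prop := ∀ (text : String), Dom_guess_quarter text → Spec_guess_quarter text (guess_quarter text)

-- ===== LEMMAS AND PROOFS =====

-- ===== VERDICT (by name: the statement is the Claim_ definition above) =====
set_option maxHeartbeats 4000000 in
theorem guess_quarter_spec : Claim_equal_guess_quarter := by
  intro text _
  unfold Spec_guess_quarter guess_quarter guess_quarter_alt
  simp only [monthsA, monthsB, guessLoopA, PySem.List.enumerate, List.filterMap]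
  generalize PySem.Str.isIn "january" (PySem.Str.lower text) = b1
  generalize PySem.Str.isIn "february" (PySem.Str.lower text) = b2
  generalize PySem.Str.isIn "march" (PySem.Str.lower text) = b3
  generalize PySem.Str.isIn "april" (PySem.Str.lower text) = b4
  generalize PySem.Str.isIn "may" (PySem.Str.lower text) = b5
  generalize PySem.Str.isIn "june" (PySem.Str.lower text) = b6
  generalize PySem.Str.isIn "july" (PySem.Str.lower text) = b7
  generalize PySem.Str.isIn "august" (PySem.Str.lower text) = b8
  generalize PySem.Str.isIn "september" (PySem.Str.lower text) = b9
  generalize PySem.Str.isIn "october" (PySem.Str.lower text) = b10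
  generalize PySem.Str.isIn "november" (PySem.Str.lower text) = b11
  generalize PySem.Str.isIn "december" (PySem.Str.lower text) = b12
  revert b1 b2 b3 b4 b5 b6 b7 b8 b9 b10 b11 b12
  decide
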